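-- pv_equiv track=rewrite | github.com/matbeedotcom/media-transparency | backend/src/mitds/api/audit.py | match_route_action
-- ===== SOURCE A (Python) =====
-- from enum import Enum
--
-- class AuditAction(str, Enum):
--     """Types of auditable actions."""
--
--     # Query actions
--     ENTITY_SEARCH = "entity_search"
--     ENTITY_VIEW = "entity_view"
--     RELATIONSHIP_QUERY = "relationship_query"
--     FUNDING_CLUSTER_QUERY = "funding_cluster_query"
--     PATH_QUERY = "path_query"
--
--     # Detection actions
--     TEMPORAL_DETECTION = "temporal_detection"
--     INFRASTRUCTURE_DETECTION = "infrastructure_detection"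
--     COMPOSITE_SCORE = "composite_score"
--
--     # Report actions
--     REPORT_GENERATE = "report_generate"
--     REPORT_EXPORT = "report_export"
--
--     # Ingestion actions
--     INGESTION_TRIGGER = "ingestion_trigger"
--
--     # Validation actions
--     VALIDATION_RUN = "validation_run"
--
-- ROUTE_ACTIONS: dict[tuple[str, str], AuditAction] = {
--     ("GET", "/api/v1/entities"): AuditAction.ENTITY_SEARCH,
--     ("GET", "/api/v1/entities/{id}"): AuditAction.ENTITY_VIEW,
--     ("GET", "/api/v1/entities/{id}/relationships"): AuditAction.RELATIONSHIP_QUERY,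
--     ("GET", "/api/v1/relationships/funding-clusters"): AuditAction.FUNDING_CLUSTER_QUERY,
--     ("GET", "/api/v1/relationships/path"): AuditAction.PATH_QUERY,
--     ("POST", "/api/v1/detection/temporal-coordination"): AuditAction.TEMPORAL_DETECTION,
--     ("GET", "/api/v1/relationships/shared-infrastructure"): AuditAction.INFRASTRUCTURE_DETECTION,
--     ("POST", "/api/v1/detection/composite-score"): AuditAction.COMPOSITE_SCORE,
--     ("POST", "/api/v1/reports"): AuditAction.REPORT_GENERATE,
--     ("GET", "/api/v1/reports/{id}"): AuditAction.REPORT_EXPORT,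
--     ("POST", "/api/v1/ingestion/{source}/trigger"): AuditAction.INGESTION_TRIGGER,
--     ("POST", "/api/v1/validation/run"): AuditAction.VALIDATION_RUN,
-- }
--
-- def match_route_action(method: str, path: str) -> AuditAction | None:
--     """Match a request to an audit action.
--
--     Args:
--         method: HTTP method
--         path: Request path
--
--     Returns:
--         Matched audit action or None
--     """
--     # Direct match
--     if (method, path) in ROUTE_ACTIONS:
--         return ROUTE_ACTIONS[(method, path)]
--
--     # Pattern matching for parameterized routes
--     for (route_method, route_pattern), action in ROUTE_ACTIONS.items():
--         if method != route_method:
--             continue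
--
--         # Convert route pattern to regex-like matching
--         pattern_parts = route_pattern.split("/")
--         path_parts = path.split("/")
--
--         if len(pattern_parts) != len(path_parts):
--             continue
--
--         match = True
--         for pattern_part, path_part in zip(pattern_parts, path_parts):
--             if pattern_part.startswith("{") and pattern_part.endswith("}"):
--                 continue  # Parameter placeholder matches any value
--             if pattern_part != path_part:
--                 match = False
--                 break
--
--         if match:
--             return action
--
--     return None
-- ===== SOURCE B (Python) =====
-- from enum import Enum
--
--
-- class AuditAction(str, Enum):
--     """Types of auditable actions."""
--
--     ENTITY_SEARCH = "entity_search"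
--     ENTITY_VIEW = "entity_view"
--     RELATIONSHIP_QUERY = "relationship_query"
--     FUNDING_CLUSTER_QUERY = "funding_cluster_query"
--     PATH_QUERY = "path_query"
--     TEMPORAL_DETECTION = "temporal_detection"
--     INFRASTRUCTURE_DETECTION = "infrastructure_detection"
--     COMPOSITE_SCORE = "composite_score"
--     REPORT_GENERATE = "report_generate"
--     REPORT_EXPORT = "report_export"
--     INGESTION_TRIGGER = "ingestion_trigger"
--     VALIDATION_RUN = "validation_run"
--
--
-- def match_route_action(method: str, path: str):
--     """Hard-coded router: structural pattern match on the method and the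
--     '/'-split path, no route table and no scanning loop.  Correct because the
--     twelve routes are pairwise disjoint (same-method, same-length patterns
--     always differ on some literal segment), so first-match order is irrelevant.
--     """
--     match method, path.split("/"):
--         case "GET", ["", "api", "v1", "entities"]:
--             return AuditAction.ENTITY_SEARCH
--         case "GET", ["", "api", "v1", "entities", _]:
--             return AuditAction.ENTITY_VIEW
--         case "GET", ["", "api", "v1", "entities", _, "relationships"]:
--             return AuditAction.RELATIONSHIP_QUERY
--         case "GET", ["", "api", "v1", "relationships", "funding-clusters"]:
--             return AuditAction.FUNDING_CLUSTER_QUERY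
--         case "GET", ["", "api", "v1", "relationships", "path"]:
--             return AuditAction.PATH_QUERY
--         case "GET", ["", "api", "v1", "relationships", "shared-infrastructure"]:
--             return AuditAction.INFRASTRUCTURE_DETECTION
--         case "GET", ["", "api", "v1", "reports", _]:
--             return AuditAction.REPORT_EXPORT
--         case "POST", ["", "api", "v1", "detection", "temporal-coordination"]:
--             return AuditAction.TEMPORAL_DETECTION
--         case "POST", ["", "api", "v1", "detection", "composite-score"]:
--             return AuditAction.COMPOSITE_SCORE
--         case "POST", ["", "api", "v1", "reports"]:
--             return AuditAction.REPORT_GENERATE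
--         case "POST", ["", "api", "v1", "ingestion", _, "trigger"]:
--             return AuditAction.INGESTION_TRIGGER
--         case "POST", ["", "api", "v1", "validation", "run"]:
--             return AuditAction.VALIDATION_RUN
--         case _:
--             return None
-- ===== Notes on version B (the rewrite author's own statement) =====
-- stated objective: simpler
-- what changed: B drops the route table and both of A's matching phases (exact dict lookup, then a scan with a flag-and-break segment loop) and routes with a single hard-coded structural pattern match on (method, path.split('/')); this is correct because the twelve routes are pairwise disjoint, so first-match order is irrelevant.
import Mathlib
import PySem

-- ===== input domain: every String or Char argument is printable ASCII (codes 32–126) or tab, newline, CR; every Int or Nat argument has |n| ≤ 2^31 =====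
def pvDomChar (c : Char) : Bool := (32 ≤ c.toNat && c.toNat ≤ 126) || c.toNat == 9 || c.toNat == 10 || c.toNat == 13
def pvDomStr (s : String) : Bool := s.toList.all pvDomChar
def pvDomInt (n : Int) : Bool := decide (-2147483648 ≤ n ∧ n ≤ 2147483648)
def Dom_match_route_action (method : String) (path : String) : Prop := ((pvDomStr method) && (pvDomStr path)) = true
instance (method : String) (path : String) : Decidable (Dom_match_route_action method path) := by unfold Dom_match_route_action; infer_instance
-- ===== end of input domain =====

-- B replaces A's route table and its two matching phases (exact dict lookup, then a table scan with
-- a flag-and-break segment loop) by a hard-coded router: one structural pattern match on the method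
-- and the '/'-split path, valid because the twelve routes are pairwise disjoint. Objective: simpler.

-- s.split("/") — exact: Str.split? is none only for sep = ""
def pvSplit (s : String) : List String := (PySem.Str.split? s "/").getD []

-- ===== PORT A =====
-- the module-level ROUTE_ACTIONS table, as its item list
def pvRouteList : List ((String × String) × String) := [
  (("GET", "/api/v1/entities"), "entity_search"),
  (("GET", "/api/v1/entities/{id}"), "entity_view"),
  (("GET", "/api/v1/entities/{id}/relationships"), "relationship_query"),
  (("GET", "/api/v1/relationships/funding-clusters"), "funding_cluster_query"),
  (("GET", "/api/v1/relationships/path"), "path_query"),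
  (("POST", "/api/v1/detection/temporal-coordination"), "temporal_detection"),
  (("GET", "/api/v1/relationships/shared-infrastructure"), "infrastructure_detection"),
  (("POST", "/api/v1/detection/composite-score"), "composite_score"),
  (("POST", "/api/v1/reports"), "report_generate"),
  (("GET", "/api/v1/reports/{id}"), "report_export"),
  (("POST", "/api/v1/ingestion/{source}/trigger"), "ingestion_trigger"),
  (("POST", "/api/v1/validation/run"), "validation_run")]

def ROUTE_ACTIONS_A : PySem.Dict (String × String) String := PySem.Dict.ofList pvRouteList

-- inner 'for pattern_part, path_part in zip(...)' loop with the match flag and break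
def pvAZip : List (String × String) → Bool
  | [] => true
  | (pp, sp) :: rest =>
    if PySem.Str.startswith pp "{" && PySem.Str.endswith pp "}" then pvAZip rest
    else if pp ≠ sp then false
    else pvAZip rest

-- the 'for (route_method, route_pattern), action in ROUTE_ACTIONS.items()' loop
def pvAScan (method path : String) : List ((String × String) × String) → Option String
  | [] => none
  | ((route_method, route_pattern), action) :: rest =>
    if method ≠ route_method then pvAScan method path rest
    else
      let pattern_parts := pvSplit route_pattern
      let path_parts := pvSplit path
      if pattern_parts.length ≠ path_parts.length then pvAScan method path rest
      else if pvAZip (pattern_parts.zip path_parts) then some action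
      else pvAScan method path rest

def match_route_action (method : String) (path : String) : Option String :=
  match ROUTE_ACTIONS_A.get? (method, path) with
  | some a => some a
  | none => pvAScan method path pvRouteList

-- ===== PORT B =====
-- the match statement of Source B, on (method, path.split("/")); '_' cases are the placeholders
def match_route_action_alt (method : String) (path : String) : Option String :=
  match method, pvSplit path with
  | "GET", ["", "api", "v1", "entities"] => some "entity_search"
  | "GET", ["", "api", "v1", "entities", _] => some "entity_view"
  | "GET", ["", "api", "v1", "entities", _, "relationships"] => some "relationship_query"
  | "GET", ["", "api", "v1", "relationships", "funding-clusters"] => some "funding_cluster_query"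
  | "GET", ["", "api", "v1", "relationships", "path"] => some "path_query"
  | "GET", ["", "api", "v1", "relationships", "shared-infrastructure"] => some "infrastructure_detection"
  | "GET", ["", "api", "v1", "reports", _] => some "report_export"
  | "POST", ["", "api", "v1", "detection", "temporal-coordination"] => some "temporal_detection"
  | "POST", ["", "api", "v1", "detection", "composite-score"] => some "composite_score"
  | "POST", ["", "api", "v1", "reports"] => some "report_generate"
  | "POST", ["", "api", "v1", "ingestion", _, "trigger"] => some "ingestion_trigger"
  | "POST", ["", "api", "v1", "validation", "run"] => some "validation_run"
  | _, _ => none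

-- ===== PRECONDITION & SPEC =====
def Spec_match_route_action (method : String) (path : String) (out : Option String) : Prop := out = match_route_action_alt method path
instance (method : String) (path : String) (out : Option String) : Decidable (Spec_match_route_action method path out) := by unfold Spec_match_route_action; infer_instance

-- ===== CLAIM (what is proved, stated in full; the proofs are below) =====
def Claim_equal_match_route_action : Prop := ∀ (method : String) (path : String), Dom_match_route_action method path → Spec_match_route_action method path (match_route_action method path)

-- ===== LEMMAS AND PROOFS =====

-- pvAScan with the path pre-split (proof helper)
def pvAScanS (method : String) (segs : List String) : List ((String × String) × String) → Option String
  | [] => none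
  | ((route_method, route_pattern), action) :: rest =>
    if method ≠ route_method then pvAScanS method segs rest
    else
      let pattern_parts := pvSplit route_pattern
      if pattern_parts.length ≠ segs.length then pvAScanS method segs rest
      else if pvAZip (pattern_parts.zip segs) then some action
      else pvAScanS method segs rest

-- the match of match_route_action_alt, on the pre-split path (proof helper)
def pvAltS (method : String) (segs : List String) : Option String :=
  match method, segs with
  | "GET", ["", "api", "v1", "entities"] => some "entity_search"
  | "GET", ["", "api", "v1", "entities", _] => some "entity_view"
  | "GET", ["", "api", "v1", "entities", _, "relationships"] => some "relationship_query"
  | "GET", ["", "api", "v1", "relationships", "funding-clusters"] => some "funding_cluster_query"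
  | "GET", ["", "api", "v1", "relationships", "path"] => some "path_query"
  | "GET", ["", "api", "v1", "relationships", "shared-infrastructure"] => some "infrastructure_detection"
  | "GET", ["", "api", "v1", "reports", _] => some "report_export"
  | "POST", ["", "api", "v1", "detection", "temporal-coordination"] => some "temporal_detection"
  | "POST", ["", "api", "v1", "detection", "composite-score"] => some "composite_score"
  | "POST", ["", "api", "v1", "reports"] => some "report_generate"
  | "POST", ["", "api", "v1", "ingestion", _, "trigger"] => some "ingestion_trigger"
  | "POST", ["", "api", "v1", "validation", "run"] => some "validation_run"
  | _, _ => none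

theorem alt_altS (method path : String) :
    match_route_action_alt method path = pvAltS method (pvSplit path) := rfl

theorem scan_scanS (method path : String) (l : List ((String × String) × String)) :
    pvAScan method path l = pvAScanS method (pvSplit path) l := by
  induction l with
  | nil => rfl
  | cons e rest ih =>
    obtain ⟨⟨rm, rp⟩, act⟩ := e
    simp only [pvAScan, pvAScanS]
    split_ifs <;> simp [ih]

-- splits of the table's patterns, precomputed
theorem sp0 : pvSplit "/api/v1/entities" = ["", "api", "v1", "entities"] := by decide
theorem sp1 : pvSplit "/api/v1/entities/{id}" = ["", "api", "v1", "entities", "{id}"] := by decide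
theorem sp2 : pvSplit "/api/v1/entities/{id}/relationships" = ["", "api", "v1", "entities", "{id}", "relationships"] := by decide
theorem sp3 : pvSplit "/api/v1/relationships/funding-clusters" = ["", "api", "v1", "relationships", "funding-clusters"] := by decide
theorem sp4 : pvSplit "/api/v1/relationships/path" = ["", "api", "v1", "relationships", "path"] := by decide
theorem sp5 : pvSplit "/api/v1/detection/temporal-coordination" = ["", "api", "v1", "detection", "temporal-coordination"] := by decide
theorem sp6 : pvSplit "/api/v1/relationships/shared-infrastructure" = ["", "api", "v1", "relationships", "shared-infrastructure"] := by decide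
theorem sp7 : pvSplit "/api/v1/detection/composite-score" = ["", "api", "v1", "detection", "composite-score"] := by decide
theorem sp8 : pvSplit "/api/v1/reports" = ["", "api", "v1", "reports"] := by decide
theorem sp9 : pvSplit "/api/v1/reports/{id}" = ["", "api", "v1", "reports", "{id}"] := by decide
theorem sp10 : pvSplit "/api/v1/ingestion/{source}/trigger" = ["", "api", "v1", "ingestion", "{source}", "trigger"] := by decide
theorem sp11 : pvSplit "/api/v1/validation/run" = ["", "api", "v1", "validation", "run"] := by decide

-- pvAZip characterized one segment at a time
theorem azip_lit (pp sp : String) (rest : List (String × String))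
    (h : (PySem.Str.startswith pp "{" && PySem.Str.endswith pp "}") = false) :
    pvAZip ((pp, sp) :: rest) = (pp == sp && pvAZip rest) := by
  simp only [pvAZip, h]
  split_ifs <;> simp_all
theorem azip_wild (pp sp : String) (rest : List (String × String))
    (h : (PySem.Str.startswith pp "{" && PySem.Str.endswith pp "}") = true) :
    pvAZip ((pp, sp) :: rest) = pvAZip rest := by
  simp only [pvAZip, h]
  simp

-- the zip loop evaluated per table segment
theorem az0 (sp : String) (rest : List (String × String)) : pvAZip (("", sp) :: rest) = (("":String) == sp && pvAZip rest) := azip_lit _ _ _ (by decide)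
theorem az1 (sp : String) (rest : List (String × String)) : pvAZip (("api", sp) :: rest) = (("api":String) == sp && pvAZip rest) := azip_lit _ _ _ (by decide)
theorem az2 (sp : String) (rest : List (String × String)) : pvAZip (("composite-score", sp) :: rest) = (("composite-score":String) == sp && pvAZip rest) := azip_lit _ _ _ (by decide)
theorem az3 (sp : String) (rest : List (String × String)) : pvAZip (("detection", sp) :: rest) = (("detection":String) == sp && pvAZip rest) := azip_lit _ _ _ (by decide)
theorem az4 (sp : String) (rest : List (String × String)) : pvAZip (("entities", sp) :: rest) = (("entities":String) == sp && pvAZip rest) := azip_lit _ _ _ (by decide)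
theorem az5 (sp : String) (rest : List (String × String)) : pvAZip (("funding-clusters", sp) :: rest) = (("funding-clusters":String) == sp && pvAZip rest) := azip_lit _ _ _ (by decide)
theorem az6 (sp : String) (rest : List (String × String)) : pvAZip (("ingestion", sp) :: rest) = (("ingestion":String) == sp && pvAZip rest) := azip_lit _ _ _ (by decide)
theorem az7 (sp : String) (rest : List (String × String)) : pvAZip (("path", sp) :: rest) = (("path":String) == sp && pvAZip rest) := azip_lit _ _ _ (by decide)
theorem az8 (sp : String) (rest : List (String × String)) : pvAZip (("relationships", sp) :: rest) = (("relationships":String) == sp && pvAZip rest) := azip_lit _ _ _ (by decide)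
theorem az9 (sp : String) (rest : List (String × String)) : pvAZip (("reports", sp) :: rest) = (("reports":String) == sp && pvAZip rest) := azip_lit _ _ _ (by decide)
theorem az10 (sp : String) (rest : List (String × String)) : pvAZip (("run", sp) :: rest) = (("run":String) == sp && pvAZip rest) := azip_lit _ _ _ (by decide)
theorem az11 (sp : String) (rest : List (String × String)) : pvAZip (("shared-infrastructure", sp) :: rest) = (("shared-infrastructure":String) == sp && pvAZip rest) := azip_lit _ _ _ (by decide)
theorem az12 (sp : String) (rest : List (String × String)) : pvAZip (("temporal-coordination", sp) :: rest) = (("temporal-coordination":String) == sp && pvAZip rest) := azip_lit _ _ _ (by decide)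
theorem az13 (sp : String) (rest : List (String × String)) : pvAZip (("trigger", sp) :: rest) = (("trigger":String) == sp && pvAZip rest) := azip_lit _ _ _ (by decide)
theorem az14 (sp : String) (rest : List (String × String)) : pvAZip (("v1", sp) :: rest) = (("v1":String) == sp && pvAZip rest) := azip_lit _ _ _ (by decide)
theorem az15 (sp : String) (rest : List (String × String)) : pvAZip (("validation", sp) :: rest) = (("validation":String) == sp && pvAZip rest) := azip_lit _ _ _ (by decide)
theorem az16 (sp : String) (rest : List (String × String)) : pvAZip (("{id}", sp) :: rest) = pvAZip rest := azip_wild _ _ _ (by decide)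
theorem az17 (sp : String) (rest : List (String × String)) : pvAZip (("{source}", sp) :: rest) = pvAZip rest := azip_wild _ _ _ (by decide)

set_option maxHeartbeats 2000000 in
theorem scanS_eq_altS (method : String) (segs : List String) :
    pvAScanS method segs pvRouteList = pvAltS method segs := by
  unfold pvAltS
  split
  all_goals try rfl
  case _ =>
    rename_i h1 h2 h3 h4 h5 h6 h7 h8 h9 h10 h11 h12
    by_cases hG : method = "GET"
    · subst hG
      rcases segs with _|⟨a,_|⟨b,_|⟨c,_|⟨d,_|⟨e,_|⟨f,_|⟨g,ts⟩⟩⟩⟩⟩⟩⟩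
      all_goals first
      | (simp_all [pvAScanS, pvRouteList, pvAZip, sp0, sp1, sp2, sp3, sp4, sp5, sp6, sp7, sp8, sp9, sp10, sp11]; done)
      | ((simp [pvAScanS, pvRouteList, sp0, sp1, sp2, sp3, sp4, sp5, sp6, sp7, sp8, sp9, sp10, sp11, az0, az1, az2, az3, az4, az5, az6, az7, az8, az9, az10, az11, az12, az13, az14, az15, az16, az17]; try split_ifs) <;> (try (intros; subst_vars)) <;> simp_all [pvAZip])
    · by_cases hP : method = "POST"
      · subst hP
        rcases segs with _|⟨a,_|⟨b,_|⟨c,_|⟨d,_|⟨e,_|⟨f,_|⟨g,ts⟩⟩⟩⟩⟩⟩⟩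
        all_goals first
        | (simp_all [pvAScanS, pvRouteList, pvAZip, sp0, sp1, sp2, sp3, sp4, sp5, sp6, sp7, sp8, sp9, sp10, sp11]; done)
        | ((simp [pvAScanS, pvRouteList, sp0, sp1, sp2, sp3, sp4, sp5, sp6, sp7, sp8, sp9, sp10, sp11, az0, az1, az2, az3, az4, az5, az6, az7, az8, az9, az10, az11, az12, az13, az14, az15, az16, az17]; try split_ifs) <;> (try (intros; subst_vars)) <;> simp_all [pvAZip])
      · simp [pvAScanS, pvRouteList, hG, hP]

-- a direct dict hit returns the value A's own pattern scan would find anyway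
theorem pvDirect_eq (method path a : String)
    (h : ROUTE_ACTIONS_A.get? (method, path) = some a) :
    pvAScan method path pvRouteList = some a := by
  have hR : ROUTE_ACTIONS_A = PySem.Dict.mk pvRouteList := by rfl
  rw [hR] at h
  simp only [pvRouteList] at h
  rw [PySem.Dict.get?_mk_cons] at h
  by_cases h0 : ((("GET" : String), ("/api/v1/entities" : String)) == (method, path)) = true
  · rw [if_pos h0] at h
    obtain ⟨hm, hp⟩ : "GET" = method ∧ "/api/v1/entities" = path := by simpa using h0
    subst hm; subst hp
    injection h with h; subst h
    decide
  rw [if_neg h0] at h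
  rw [PySem.Dict.get?_mk_cons] at h
  by_cases h1 : ((("GET" : String), ("/api/v1/entities/{id}" : String)) == (method, path)) = true
  · rw [if_pos h1] at h
    obtain ⟨hm, hp⟩ : "GET" = method ∧ "/api/v1/entities/{id}" = path := by simpa using h1
    subst hm; subst hp
    injection h with h; subst h
    decide
  rw [if_neg h1] at h
  rw [PySem.Dict.get?_mk_cons] at h
  by_cases h2 : ((("GET" : String), ("/api/v1/entities/{id}/relationships" : String)) == (method, path)) = true
  · rw [if_pos h2] at h
    obtain ⟨hm, hp⟩ : "GET" = method ∧ "/api/v1/entities/{id}/relationships" = path := by simpa using h2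
    subst hm; subst hp
    injection h with h; subst h
    decide
  rw [if_neg h2] at h
  rw [PySem.Dict.get?_mk_cons] at h
  by_cases h3 : ((("GET" : String), ("/api/v1/relationships/funding-clusters" : String)) == (method, path)) = true
  · rw [if_pos h3] at h
    obtain ⟨hm, hp⟩ : "GET" = method ∧ "/api/v1/relationships/funding-clusters" = path := by simpa using h3
    subst hm; subst hp
    injection h with h; subst h
    decide
  rw [if_neg h3] at h
  rw [PySem.Dict.get?_mk_cons] at h
  by_cases h4 : ((("GET" : String), ("/api/v1/relationships/path" : String)) == (method, path)) = true
  · rw [if_pos h4] at h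
    obtain ⟨hm, hp⟩ : "GET" = method ∧ "/api/v1/relationships/path" = path := by simpa using h4
    subst hm; subst hp
    injection h with h; subst h
    decide
  rw [if_neg h4] at h
  rw [PySem.Dict.get?_mk_cons] at h
  by_cases h5 : ((("POST" : String), ("/api/v1/detection/temporal-coordination" : String)) == (method, path)) = true
  · rw [if_pos h5] at h
    obtain ⟨hm, hp⟩ : "POST" = method ∧ "/api/v1/detection/temporal-coordination" = path := by simpa using h5
    subst hm; subst hp
    injection h with h; subst h
    decide
  rw [if_neg h5] at h
  rw [PySem.Dict.get?_mk_cons] at h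
  by_cases h6 : ((("GET" : String), ("/api/v1/relationships/shared-infrastructure" : String)) == (method, path)) = true
  · rw [if_pos h6] at h
    obtain ⟨hm, hp⟩ : "GET" = method ∧ "/api/v1/relationships/shared-infrastructure" = path := by simpa using h6
    subst hm; subst hp
    injection h with h; subst h
    decide
  rw [if_neg h6] at h
  rw [PySem.Dict.get?_mk_cons] at h
  by_cases h7 : ((("POST" : String), ("/api/v1/detection/composite-score" : String)) == (method, path)) = true
  · rw [if_pos h7] at h
    obtain ⟨hm, hp⟩ : "POST" = method ∧ "/api/v1/detection/composite-score" = path := by simpa using h7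
    subst hm; subst hp
    injection h with h; subst h
    decide
  rw [if_neg h7] at h
  rw [PySem.Dict.get?_mk_cons] at h
  by_cases h8 : ((("POST" : String), ("/api/v1/reports" : String)) == (method, path)) = true
  · rw [if_pos h8] at h
    obtain ⟨hm, hp⟩ : "POST" = method ∧ "/api/v1/reports" = path := by simpa using h8
    subst hm; subst hp
    injection h with h; subst h
    decide
  rw [if_neg h8] at h
  rw [PySem.Dict.get?_mk_cons] at h
  by_cases h9 : ((("GET" : String), ("/api/v1/reports/{id}" : String)) == (method, path)) = true
  · rw [if_pos h9] at h
    obtain ⟨hm, hp⟩ : "GET" = method ∧ "/api/v1/reports/{id}" = path := by simpa using h9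
    subst hm; subst hp
    injection h with h; subst h
    decide
  rw [if_neg h9] at h
  rw [PySem.Dict.get?_mk_cons] at h
  by_cases h10 : ((("POST" : String), ("/api/v1/ingestion/{source}/trigger" : String)) == (method, path)) = true
  · rw [if_pos h10] at h
    obtain ⟨hm, hp⟩ : "POST" = method ∧ "/api/v1/ingestion/{source}/trigger" = path := by simpa using h10
    subst hm; subst hp
    injection h with h; subst h
    decide
  rw [if_neg h10] at h
  rw [PySem.Dict.get?_mk_cons] at h
  by_cases h11 : ((("POST" : String), ("/api/v1/validation/run" : String)) == (method, path)) = true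
  · rw [if_pos h11] at h
    obtain ⟨hm, hp⟩ : "POST" = method ∧ "/api/v1/validation/run" = path := by simpa using h11
    subst hm; subst hp
    injection h with h; subst h
    decide
  rw [if_neg h11] at h
  simp [PySem.Dict.get?] at h

-- ===== VERDICT (by name: the statement is the Claim_ definition above) =====
theorem match_route_action_spec : Claim_equal_match_route_action := by
  intro method path _
  unfold Spec_match_route_action match_route_action
  rw [alt_altS]
  cases hd : ROUTE_ACTIONS_A.get? (method, path) with
  | none =>
    show pvAScan method path pvRouteList = pvAltS method (pvSplit path)
    rw [scan_scanS]
    exact scanS_eq_altS method (pvSplit path)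
  | some a =>
    show some a = pvAltS method (pvSplit path)
    have hs := pvDirect_eq method path a hd
    rw [scan_scanS] at hs
    rw [← hs]
    exact scanS_eq_altS method (pvSplit path)
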